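-- pv_equiv track=rewrite | github.com/Theo-a/UBA | clase7.py | mcd_max
-- ===== SOURCE A (Python) =====
-- def mcd2(a,b):
--     div_com = []
--     for i in lis_divs(a):
--         if i in lis_divs(b):
--             div_com.append(i)
--     mcd = 0
--     for k in div_com:
--         if k > mcd:
--             mcd = k
--     return mcd
--
-- def lis_divs(n):
--     Divs = []
--     for i in range(1,n+1):
--         if n%i == 0:
--             Divs.append(i)
--     return Divs
--
-- def mcd_max(n):
--     lis = []
--     for i in range(1,n-1):
--         for j in range(1,n):
--             lis.append(mcd2(i,j))
--     res = 0
--     for k in lis: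
--         if k > res:
--             res = k
--     return res
-- ===== SOURCE B (Python) =====
-- def mcd_max(n):
--     # max gcd(i, j) for 1 <= i <= n-2, 1 <= j <= n-1 is attained at i = j = n-2
--     return n - 2 if n >= 3 else 0
-- ===== Notes on version B (the rewrite author's own statement) =====
-- stated objective: faster
-- what changed: Replaced the triple-nested divisor-list search for the maximum pairwise gcd with the closed form n-2 (attained at gcd(n-2,n-2)), 0 for n<3.
import Mathlib
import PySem

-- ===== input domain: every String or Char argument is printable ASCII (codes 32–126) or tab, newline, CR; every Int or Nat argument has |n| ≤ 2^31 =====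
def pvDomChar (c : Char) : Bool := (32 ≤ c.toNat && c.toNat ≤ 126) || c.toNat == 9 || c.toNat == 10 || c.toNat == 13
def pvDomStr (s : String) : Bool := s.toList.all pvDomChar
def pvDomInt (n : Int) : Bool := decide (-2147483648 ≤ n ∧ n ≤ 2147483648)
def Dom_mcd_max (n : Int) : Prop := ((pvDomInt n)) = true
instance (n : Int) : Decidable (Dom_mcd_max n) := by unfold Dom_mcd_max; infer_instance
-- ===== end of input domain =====

-- B replaces A's triple-nested divisor search with the closed form n-2 (n ≥ 3), else 0: faster (O(1) vs O(n^3)).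

-- ===== PORT A =====
def lis_divs (n : Int) : List Int :=
  (PySem.List.pyRange 1 (n + 1) 1).foldl
    (fun acc i => if PySem.Int.mod n i = 0 then acc ++ [i] else acc) []

def mcd2 (a b : Int) : Int :=
  let div_com := (lis_divs a).foldl
    (fun acc i => if i ∈ lis_divs b then acc ++ [i] else acc) []
  div_com.foldl (fun mcd k => if k > mcd then k else mcd) 0

def mcd_max (n : Int) : Int :=
  let lis := (PySem.List.pyRange 1 (n - 1) 1).foldl
    (fun acc i => (PySem.List.pyRange 1 n 1).foldl
      (fun acc2 j => acc2 ++ [mcd2 i j]) acc) []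
  lis.foldl (fun res k => if k > res then k else res) 0

-- ===== PORT B =====
def mcd_max_alt (n : Int) : Int := if n ≥ 3 then n - 2 else 0

-- ===== PRECONDITION & SPEC =====
def Spec_mcd_max (n : Int) (out : Int) : Prop := out = mcd_max_alt n
instance (n : Int) (out : Int) : Decidable (Spec_mcd_max n out) := by unfold Spec_mcd_max; infer_instance

-- ===== CLAIM (what is proved, stated in full; the proofs are below) =====
def Claim_equal_mcd_max : Prop := ∀ (n : Int), Dom_mcd_max n → Spec_mcd_max n (mcd_max n)

-- ===== LEMMAS AND PROOFS =====

-- the running-max loop 'if k > r: r = k' is foldl max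
theorem if_gt_eq_max : (fun (r k : Int) => if k > r then k else r) = max := by
  funext r k; simp [max_def]; split_ifs <;> omega

theorem mem_lis_divs (n x : Int) :
    x ∈ lis_divs n ↔ (1 ≤ x ∧ x < n + 1) ∧ PySem.Int.mod n x = 0 := by
  simp [lis_divs, PySem.List.foldl_append_ite_eq_filter, List.mem_filter,
    PySem.List.mem_pyRange_one]

theorem mcd2_eq_foldl_max (a b : Int) :
    mcd2 a b = ((lis_divs a).filter (fun i => decide (i ∈ lis_divs b))).foldl max 0 := by
  simp [mcd2, PySem.List.foldl_append_ite_eq_filter, if_gt_eq_max]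

theorem mcd2_le (a b : Int) : mcd2 a b ≤ max 0 a := by
  rw [mcd2_eq_foldl_max]
  rcases PySem.List.foldl_max_mem ((lis_divs a).filter (fun i => decide (i ∈ lis_divs b))) 0 with h | h
  · simp [h]
  · have := ((mem_lis_divs a _).1 (List.mem_of_mem_filter h)).1
    omega

theorem mem_lis_divs_self (a : Int) (ha : 1 ≤ a) : a ∈ lis_divs a := by
  rw [mem_lis_divs]
  refine ⟨⟨ha, by omega⟩, ?_⟩
  rw [PySem.Int.mod_eq_zero_iff_dvd]

theorem mcd2_self (a : Int) (ha : 1 ≤ a) : mcd2 a a = a := by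
  have hmem : a ∈ (lis_divs a).filter (fun i => decide (i ∈ lis_divs a)) := by
    rw [List.mem_filter]
    simp [mem_lis_divs_self a ha]
  refine le_antisymm (by have := mcd2_le a a; omega) ?_
  rw [mcd2_eq_foldl_max]
  exact (PySem.List.le_foldl_max _ 0).2 a hmem

theorem lis_eq (n : Int) :
    (PySem.List.pyRange 1 (n - 1) 1).foldl
      (fun acc i => (PySem.List.pyRange 1 n 1).foldl
        (fun acc2 j => acc2 ++ [mcd2 i j]) acc) [] =
    (PySem.List.pyRange 1 (n - 1) 1).flatMap
      (fun i => (PySem.List.pyRange 1 n 1).map (mcd2 i)) := by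
  have h : ∀ (acc : List Int) (i : Int),
      (PySem.List.pyRange 1 n 1).foldl (fun acc2 j => acc2 ++ [mcd2 i j]) acc
        = acc ++ (PySem.List.pyRange 1 n 1).map (mcd2 i) :=
    fun acc i => PySem.List.foldl_append_singleton_eq_map ..
  simp only [h]
  exact PySem.List.foldl_append_eq_flatMap ..

-- ===== VERDICT (by name: the statement is the Claim_ definition above) =====
theorem mcd_max_spec : Claim_equal_mcd_max := by
  intro n _
  simp only [Spec_mcd_max, mcd_max, mcd_max_alt]
  rw [lis_eq n, if_gt_eq_max]
  by_cases h3 : n ≥ 3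
  · rw [if_pos h3]
    apply le_antisymm
    · rcases PySem.List.foldl_max_mem ((PySem.List.pyRange 1 (n - 1) 1).flatMap
        (fun i => (PySem.List.pyRange 1 n 1).map (mcd2 i))) 0 with h | h
      · rw [h]; omega
      · rw [List.mem_flatMap] at h
        obtain ⟨i, hi, hx⟩ := h
        rw [List.mem_map] at hx
        obtain ⟨j, _, heq⟩ := hx
        rw [← heq]
        rw [PySem.List.mem_pyRange_one] at hi
        have := mcd2_le i j
        omega
    · have hmem : n - 2 ∈ (PySem.List.pyRange 1 (n - 1) 1).flatMap
          (fun i => (PySem.List.pyRange 1 n 1).map (mcd2 i)) := by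
        rw [List.mem_flatMap]
        refine ⟨n - 2, ?_, ?_⟩
        · rw [PySem.List.mem_pyRange_one]; omega
        · rw [List.mem_map]
          exact ⟨n - 2, by rw [PySem.List.mem_pyRange_one]; omega,
            mcd2_self (n - 2) (by omega)⟩
      exact (PySem.List.le_foldl_max _ 0).2 _ hmem
  · rw [if_neg h3]
    have hnil : PySem.List.pyRange 1 (n - 1) 1 = [] := by
      rw [List.eq_nil_iff_forall_not_mem]
      intro x hx
      rw [PySem.List.mem_pyRange_one] at hx
      omega
    simp [hnil]
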